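-- pv_equiv track=rewrite | github.com/vsemenyakin/Space | _/python/utils/osint_stringUtils.py | batchStringEscaping_forEchoCommand
-- ===== SOURCE A (Python) =====
-- def batchStringEscaping_forEchoCommand(string, escapeOnlyThisSymbols = None):
--
--   resultString = ""
--
--   percentEscapedSymbols = "%"
--   oneUpArrowEscapedSymbols = "^"
--   threeUpArrowsEscapedSymbols = "&<>|'`,;=()!\"\\[].*?"
--
--   for char in string:
--     if escapeOnlyThisSymbols != None and (not char in escapeOnlyThisSymbols):
--       resultString = resultString + char
--     elif char in percentEscapedSymbols:
--       resultString = resultString + "%" + char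
--     elif char in oneUpArrowEscapedSymbols:
--       resultString = resultString + "^" + char
--     elif char in threeUpArrowsEscapedSymbols:
--       resultString = resultString + "^^^" + char
--     else:
--       resultString = resultString + char
--
--   return resultString
-- ===== SOURCE B (Python) =====
-- def batchStringEscaping_forEchoCommand(string, escapeOnlyThisSymbols = None):
--   specials = {'%': '%%', '^': '^^'}
--   for c in "&<>|'`,;=()!\"\\[].*?":
--     specials[c] = '^^^' + c
--   if escapeOnlyThisSymbols is not None:
--     specials = {c: r for c, r in specials.items() if c in escapeOnlyThisSymbols}
--   return string.translate(str.maketrans(specials))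
-- ===== Notes on version B (the rewrite author's own statement) =====
-- stated objective: idiomatic
-- what changed: B builds a translation table (dict of char to replacement, filtered by escapeOnlyThisSymbols) once and returns string.translate(table) in one pass, replacing A's per-character elif membership cascade with repeated string concatenation.
import Mathlib
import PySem

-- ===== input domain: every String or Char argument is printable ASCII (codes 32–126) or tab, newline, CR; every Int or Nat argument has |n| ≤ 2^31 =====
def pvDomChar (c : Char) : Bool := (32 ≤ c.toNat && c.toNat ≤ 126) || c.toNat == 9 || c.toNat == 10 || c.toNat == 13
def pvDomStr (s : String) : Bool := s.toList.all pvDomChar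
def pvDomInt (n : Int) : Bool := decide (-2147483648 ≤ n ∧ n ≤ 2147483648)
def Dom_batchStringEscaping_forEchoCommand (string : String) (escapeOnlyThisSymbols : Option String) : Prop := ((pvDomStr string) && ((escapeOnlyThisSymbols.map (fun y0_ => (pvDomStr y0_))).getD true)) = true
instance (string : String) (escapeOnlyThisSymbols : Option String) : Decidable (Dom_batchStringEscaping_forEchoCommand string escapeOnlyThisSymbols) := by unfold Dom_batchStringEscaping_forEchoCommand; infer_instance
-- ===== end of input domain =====

-- B builds the escape table once (a dict, filtered by escapeOnlyThisSymbols) and maps every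
-- character through a single lookup, instead of A's per-character elif membership cascade
-- (objective: idiomatic build-table-then-translate; equivalence of the RETURN value is proved).


-- ===== PORT A =====
-- Literal transliteration of A: the result string is carried as its List Char; each loop
-- iteration appends via the same five-branch elif cascade ('c in s' = membership in s.toList).
def batchStringEscaping_forEchoCommand (string : String) (escapeOnlyThisSymbols : Option String) : String :=
  let percentEscapedSymbols : String := "%"
  let oneUpArrowEscapedSymbols : String := "^"
  let threeUpArrowsEscapedSymbols : String := "&<>|'`,;=()!\"\\[].*?"
  String.ofList (string.toList.foldl (fun resultString char =>
    if (match escapeOnlyThisSymbols with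
        | none => false
        | some s => !(s.toList.contains char)) then resultString ++ [char]
    else if percentEscapedSymbols.toList.contains char then resultString ++ '%' :: [char]
    else if oneUpArrowEscapedSymbols.toList.contains char then resultString ++ '^' :: [char]
    else if threeUpArrowsEscapedSymbols.toList.contains char then
      resultString ++ '^' :: '^' :: '^' :: [char]
    else resultString ++ [char]) [])

-- ===== PORT B =====
-- B's dict {'%': '%%', '^': '^^'} extended by a loop over the three-up-arrow characters;
-- replacement strings are carried as List Char.
def pvSpecials : PySem.Dict Char (List Char) :=
  ("&<>|'`,;=()!\"\\[].*?".toList).foldl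
    (fun d c => d.insert c ('^' :: '^' :: '^' :: [c]))
    (PySem.Dict.ofList [('%', ['%', '%']), ('^', ['^', '^'])])

-- str.translate: every character is replaced by its table entry, or kept when absent.
def batchStringEscaping_forEchoCommand_alt (string : String) (escapeOnlyThisSymbols : Option String) : String :=
  let table : PySem.Dict Char (List Char) :=
    match escapeOnlyThisSymbols with
    | none => pvSpecials
    | some s => PySem.Dict.mk (pvSpecials.items.filter (fun e => s.toList.contains e.1))
  String.ofList (string.toList.flatMap (fun c => table.getD c [c]))

-- ===== PRECONDITION & SPEC =====
def Spec_batchStringEscaping_forEchoCommand (string : String) (escapeOnlyThisSymbols : Option String) (out : String) : Prop := out = batchStringEscaping_forEchoCommand_alt string escapeOnlyThisSymbols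
instance (string : String) (escapeOnlyThisSymbols : Option String) (out : String) : Decidable (Spec_batchStringEscaping_forEchoCommand string escapeOnlyThisSymbols out) := by unfold Spec_batchStringEscaping_forEchoCommand; infer_instance

-- ===== CLAIM (what is proved, stated in full; the proofs are below) =====
def Claim_equal_batchStringEscaping_forEchoCommand : Prop := ∀ (string : String) (escapeOnlyThisSymbols : Option String), Dom_batchStringEscaping_forEchoCommand string escapeOnlyThisSymbols → Spec_batchStringEscaping_forEchoCommand string escapeOnlyThisSymbols (batchStringEscaping_forEchoCommand string escapeOnlyThisSymbols)

-- ===== LEMMAS AND PROOFS =====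

-- A's per-character contribution (the piece each elif branch appends).
def pvPieceA (escapeOnlyThisSymbols : Option String) (c : Char) : List Char :=
  if (match escapeOnlyThisSymbols with
      | none => false
      | some s => !(s.toList.contains c)) then [c]
  else if ("%".toList.contains c) then '%' :: [c]
  else if ("^".toList.contains c) then '^' :: [c]
  else if ("&<>|'`,;=()!\"\\[].*?".toList.contains c) then '^' :: '^' :: '^' :: [c]
  else [c]

-- pvSpecials as an explicit literal dict.
theorem pvSpecials_eq :
    pvSpecials = PySem.Dict.mk (('%', ['%', '%']) :: ('^', ['^', '^']) ::
      ("&<>|'`,;=()!\"\\[].*?".toList.map (fun k => (k, ['^', '^', '^', k])))) := by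
  decide

theorem getD_mk_cons (k : Char) (v : List Char) (rest : List (Char × List Char))
    (c : Char) (d : List Char) :
    (PySem.Dict.mk ((k, v) :: rest)).getD c d =
      if k == c then v else (PySem.Dict.mk rest).getD c d := by
  rw [PySem.Dict.getD_eq_get?_getD, PySem.Dict.get?_mk_cons]
  cases h : (k == c) <;> simp [PySem.Dict.getD_eq_get?_getD]

theorem getD_mk_mapkeys (ks : List Char) (c : Char) (d : List Char) :
    (PySem.Dict.mk (ks.map (fun k => (k, ['^', '^', '^', k])))).getD c d =
      if ks.contains c then '^' :: '^' :: '^' :: [c] else d := by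
  induction ks with
  | nil => rfl
  | cons k ks ih =>
    by_cases hk : k = c
    · subst hk
      simp [getD_mk_cons]
    · simp [getD_mk_cons, ih, hk, Ne.symm hk]

theorem getD_mk_filter (p : Char → Bool) (l : List (Char × List Char)) (c : Char) (d : List Char) :
    (PySem.Dict.mk (l.filter (fun e => p e.1))).getD c d =
      if p c then (PySem.Dict.mk l).getD c d else d := by
  induction l with
  | nil =>
    rw [List.filter_nil]
    cases hp : p c <;> rfl
  | cons e l ih =>
    obtain ⟨k, v⟩ := e
    by_cases hk : k = c
    · subst hk
      cases hp : p k <;> simp [hp, getD_mk_cons, ih]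
    · have hbk : (k == c) = false := by simp [hk]
      cases hp : p k <;> simp [hp, getD_mk_cons, hbk, ih]

theorem pvPieceA_none (c : Char) : pvPieceA none c = pvSpecials.getD c [c] := by
  rw [pvSpecials_eq]
  by_cases h1 : c = '%'
  · subst h1; decide
  · by_cases h2 : c = '^'
    · subst h2; decide
    · simp only [getD_mk_cons, getD_mk_mapkeys]
      simp [pvPieceA, h1, h2, Ne.symm h1, Ne.symm h2]

theorem pvPieceA_eq (escapeOnlyThisSymbols : Option String) (c : Char) :
    pvPieceA escapeOnlyThisSymbols c =
      (match escapeOnlyThisSymbols with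
       | none => pvSpecials
       | some s => PySem.Dict.mk (pvSpecials.items.filter (fun e => s.toList.contains e.1))).getD c [c] := by
  cases escapeOnlyThisSymbols with
  | none => exact pvPieceA_none c
  | some s =>
    have hitems : pvSpecials = PySem.Dict.mk pvSpecials.items := rfl
    rw [getD_mk_filter (fun x => s.toList.contains x) pvSpecials.items c [c], ← hitems]
    cases hc : s.toList.contains c
    · have hm : c ∉ s.toList := by simpa using hc
      simp [pvPieceA, hm]
    · have hm : c ∈ s.toList := by simpa using hc
      rw [if_pos rfl, ← pvPieceA_none c]
      simp [pvPieceA, hm]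

theorem pvLoop_eq (g : Char → List Char) (f : List Char → Char → List Char)
    (h : ∀ acc c, f acc c = acc ++ g c) :
    ∀ (l : List Char) (acc : List Char), l.foldl f acc = acc ++ l.flatMap g := by
  intro l
  induction l with
  | nil => intro acc; simp
  | cons c l ih => intro acc; simp [List.foldl_cons, h, ih]

-- ===== VERDICT (by name: the statement is the Claim_ definition above) =====
theorem batchStringEscaping_forEchoCommand_spec : Claim_equal_batchStringEscaping_forEchoCommand := by
  intro string escapeOnlyThisSymbols _
  unfold Spec_batchStringEscaping_forEchoCommand
  simp only [batchStringEscaping_forEchoCommand, batchStringEscaping_forEchoCommand_alt]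
  congr 1
  rw [pvLoop_eq (g := fun c => pvPieceA escapeOnlyThisSymbols c)]
  · simp only [List.nil_append]
    congr 1
    funext c
    exact pvPieceA_eq escapeOnlyThisSymbols c
  · intro acc c
    simp only [pvPieceA]
    split_ifs <;> rfl
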